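-- pv_equiv track=rewrite | github.com/mcoski8/tw | analysis/scripts/high_only_v16_residual.py | decode_setting
-- ===== SOURCE A (Python) =====
-- def decode_setting(setting_idx: int) -> tuple[int, tuple[int, int]]:
--     """Return (top_idx, (mid_a_idx, mid_b_idx)) where indices are 0..6
--     refer to position in the sorted 7-card hand."""
--     top_idx = setting_idx // 15
--     mid_combo = setting_idx % 15
--     rest = [i for i in range(7) if i != top_idx]
--     # 15 = C(6,2). enumerate combos in lex order.
--     pairs = []
--     for a in range(6):
--         for b in range(a + 1, 6):
--             pairs.append((rest[a], rest[b]))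
--     return top_idx, pairs[mid_combo]
-- ===== SOURCE B (Python) =====
-- def decode_setting(setting_idx: int) -> tuple[int, tuple[int, int]]:
--     """Return (top_idx, (mid_a_idx, mid_b_idx)); the middle pair is unranked
--     arithmetically from lex order instead of building the table of 15 pairs."""
--     top_idx = setting_idx // 15
--     mid = setting_idx % 15
--     rest = [i for i in range(7) if i != top_idx]
--     a = 0
--     while a < 5 and mid >= 5 - a:
--         mid -= 5 - a
--         a += 1
--     return top_idx, (rest[a], rest[a + 1 + mid])
-- ===== Notes on version B (the rewrite author's own statement) =====
-- stated objective: alternative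
-- what changed: B unranks the lex combination index arithmetically with a short subtract-block loop instead of materializing the full table of middle-card pairs via a nested loop and indexing into it.
import Mathlib
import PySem

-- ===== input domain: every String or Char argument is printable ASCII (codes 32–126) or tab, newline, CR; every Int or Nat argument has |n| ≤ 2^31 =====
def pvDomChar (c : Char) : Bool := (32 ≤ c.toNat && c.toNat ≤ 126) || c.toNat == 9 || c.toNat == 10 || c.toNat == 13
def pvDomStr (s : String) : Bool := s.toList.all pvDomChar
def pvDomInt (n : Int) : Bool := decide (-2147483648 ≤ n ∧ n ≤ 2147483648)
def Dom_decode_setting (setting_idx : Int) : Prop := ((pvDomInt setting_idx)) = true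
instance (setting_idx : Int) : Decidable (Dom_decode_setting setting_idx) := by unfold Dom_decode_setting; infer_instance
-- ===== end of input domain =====

-- B replaces A's materialized 15-pair table with direct arithmetic unranking of the pair (alternative decomposition, same cost).

-- ===== PORT A =====
-- list indexings rest[a], rest[b], pairs[mid_combo] are always in range in A, so pyGet? …, getD is exact
def decode_setting (setting_idx : Int) : Int × (Int × Int) :=
  let top_idx := PySem.Int.floordiv setting_idx 15
  let mid_combo := PySem.Int.mod setting_idx 15
  let rest := (PySem.List.pyRange 0 7 1).filter (fun i => i != top_idx)
  let pairs := (PySem.List.pyRange 0 6 1).foldl (fun acc a =>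
    (PySem.List.pyRange (a + 1) 6 1).foldl (fun acc2 b =>
      acc2 ++ [((PySem.List.pyGet? rest a).getD 0, (PySem.List.pyGet? rest b).getD 0)]) acc) []
  (top_idx, (PySem.List.pyGet? pairs mid_combo).getD (0, 0))

-- ===== PORT B =====
-- the while loop of Source B; it runs at most 5 times (guard a < 5), hence structural fuel 5 is exact
def pvUnrank : Nat → Int → Int → Int × Int
  | 0, a, mid => (a, mid)
  | fuel + 1, a, mid =>
    if a < 5 ∧ mid ≥ 5 - a then pvUnrank fuel (a + 1) (mid - (5 - a)) else (a, mid)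

def decode_setting_alt (setting_idx : Int) : Int × (Int × Int) :=
  let top_idx := PySem.Int.floordiv setting_idx 15
  let mid0 := PySem.Int.mod setting_idx 15
  let rest := (PySem.List.pyRange 0 7 1).filter (fun i => i != top_idx)
  let am := pvUnrank 5 0 mid0
  (top_idx, ((PySem.List.pyGet? rest am.1).getD 0, (PySem.List.pyGet? rest (am.1 + 1 + am.2)).getD 0))

-- ===== PRECONDITION & SPEC =====
def Spec_decode_setting (setting_idx : Int) (out : Int × (Int × Int)) : Prop := out = decode_setting_alt setting_idx
instance (setting_idx : Int) (out : Int × (Int × Int)) : Decidable (Spec_decode_setting setting_idx out) := by unfold Spec_decode_setting; infer_instance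

-- ===== CLAIM (what is proved, stated in full; the proofs are below) =====
def Claim_equal_decode_setting : Prop := ∀ (setting_idx : Int), Dom_decode_setting setting_idx → Spec_decode_setting setting_idx (decode_setting setting_idx)

-- ===== LEMMAS AND PROOFS =====

-- the two bodies agree for any top index t and any middle combo index 0 ≤ m < 15
theorem pv_body_eq (t m : Int) (hm0 : 0 ≤ m) (hm15 : m < 15) :
    (let rest := (PySem.List.pyRange 0 7 1).filter (fun i => i != t)
     let pairs := (PySem.List.pyRange 0 6 1).foldl (fun acc a =>
        (PySem.List.pyRange (a + 1) 6 1).foldl (fun acc2 b =>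
          acc2 ++ [((PySem.List.pyGet? rest a).getD 0, (PySem.List.pyGet? rest b).getD 0)]) acc) []
     ((PySem.List.pyGet? pairs m).getD (0, 0)))
    =
    (let rest := (PySem.List.pyRange 0 7 1).filter (fun i => i != t)
     let am := pvUnrank 5 0 m
     (((PySem.List.pyGet? rest am.1).getD 0, (PySem.List.pyGet? rest (am.1 + 1 + am.2)).getD 0))) := by
  have ht : t = 0 ∨ t = 1 ∨ t = 2 ∨ t = 3 ∨ t = 4 ∨ t = 5 ∨ t = 6 ∨ (t < 0 ∨ 6 < t) := by omega
  rcases ht with h | h | h | h | h | h | h | h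
  all_goals try (subst h; interval_cases m <;> decide)
  have hr : ((PySem.List.pyRange 0 7 1).filter (fun i => i != t)) = PySem.List.pyRange 0 7 1 := by
    rw [List.filter_eq_self]
    intro a ha
    rw [show PySem.List.pyRange 0 7 1 = ([0, 1, 2, 3, 4, 5, 6] : List Int) from by decide] at ha
    simp only [List.mem_cons, List.not_mem_nil, or_false] at ha
    simp only [bne_iff_ne, ne_eq]
    omega
  simp only [hr]
  interval_cases m <;> decide

theorem decode_setting_spec' (setting_idx : Int) :
    decode_setting setting_idx = decode_setting_alt setting_idx := by
  have hm0 : 0 ≤ PySem.Int.mod setting_idx 15 := by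
    rw [PySem.Int.mod_eq_emod_of_pos (by norm_num)]
    exact Int.emod_nonneg _ (by norm_num)
  have hm15 : PySem.Int.mod setting_idx 15 < 15 := by
    rw [PySem.Int.mod_eq_emod_of_pos (by norm_num)]
    exact Int.emod_lt_of_pos _ (by norm_num)
  have h := pv_body_eq (PySem.Int.floordiv setting_idx 15) (PySem.Int.mod setting_idx 15) hm0 hm15
  simp only at h
  simp only [decode_setting, decode_setting_alt]
  exact congrArg (fun p => (PySem.Int.floordiv setting_idx 15, p)) h

-- ===== VERDICT (by name: the statement is the Claim_ definition above) =====
theorem decode_setting_spec : Claim_equal_decode_setting := by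
  intro setting_idx _
  exact decode_setting_spec' setting_idx
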